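-- pv_equiv track=rewrite | github.com/unitaryfoundation/clifft | tests/python/test_structural_oracles.py | _breathing_circuit
-- ===== SOURCE A (Python) =====
-- def _breathing_circuit(n_rounds: int) -> str:
--     """Generate a circuit that breathes k: 1 -> 2 -> 1 repeatedly.
--
--     Qubit 0 starts in an active non-Clifford state (H;T -> k=1).
--     Each round injects qubit 1 into the active array (H;T -> k=2),
--     entangles it with qubit 0 (CX), then measures qubit 1 (k -> 1)
--     and resets it for the next round.
--
--     Args:
--         n_rounds: Number of inject-entangle-measure rounds.
--
--     Returns:
--         Circuit string in .stim format.
--     """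
--     lines = ["H 0", "T 0"]  # Qubit 0 enters active array (k=1)
--     for _ in range(n_rounds):
--         lines.append("H 1")
--         lines.append("T 1")  # k: 1 -> 2
--         lines.append("CX 1 0")  # Entangle
--         lines.append("M 1")  # k: 2 -> 1
--         lines.append("R 1")  # Reset for next round
--     lines.append("M 0")
--     return "\n".join(lines)
-- ===== SOURCE B (Python) =====
-- def _breathing_circuit(n_rounds: int) -> str:
--     block = "\nH 1\nT 1\nCX 1 0\nM 1\nR 1"
--     return "H 0\nT 0" + block * n_rounds + "\nM 0"
-- ===== Notes on version B (the rewrite author's own statement) =====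
-- stated objective: idiomatic
-- what changed: Replaces the per-round list-append loop and '\n'.join with a single string multiplication of the fixed five-line round block between a constant prefix and suffix.
import Mathlib
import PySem

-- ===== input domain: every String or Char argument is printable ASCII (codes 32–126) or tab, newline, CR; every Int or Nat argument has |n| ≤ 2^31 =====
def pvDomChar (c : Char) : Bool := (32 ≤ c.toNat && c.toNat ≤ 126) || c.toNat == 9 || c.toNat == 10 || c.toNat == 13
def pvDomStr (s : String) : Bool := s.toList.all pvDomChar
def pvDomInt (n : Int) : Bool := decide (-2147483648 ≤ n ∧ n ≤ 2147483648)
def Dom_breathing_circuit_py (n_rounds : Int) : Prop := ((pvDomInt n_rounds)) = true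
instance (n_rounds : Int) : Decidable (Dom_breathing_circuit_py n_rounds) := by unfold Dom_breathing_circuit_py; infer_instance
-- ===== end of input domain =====

-- B replaces A's per-round append loop + join by one string multiplication of the fixed round block (idiomatic).

-- ===== PORT A =====
-- lines = ["H 0","T 0"]; for _ in range(n_rounds): append the five round lines; append "M 0"; "\n".join(lines)
def breathing_circuit_py (n_rounds : Int) : String :=
  let lines : List String := ["H 0", "T 0"]
  let lines := (PySem.List.pyRange 0 n_rounds 1).foldl
    (fun acc _ => acc ++ ["H 1"] ++ ["T 1"] ++ ["CX 1 0"] ++ ["M 1"] ++ ["R 1"]) lines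
  let lines := lines ++ ["M 0"]
  PySem.Str.join "\n" lines

-- ===== PORT B =====
-- Python 'block * n_rounds': n_rounds.toNat copies concatenated (empty for n_rounds ≤ 0); exact for str * int
def pyStrMul (s : String) (n : Int) : String :=
  String.ofList (List.replicate n.toNat s.toList).flatten

def breathing_circuit_py_alt (n_rounds : Int) : String :=
  "H 0\nT 0" ++ pyStrMul "\nH 1\nT 1\nCX 1 0\nM 1\nR 1" n_rounds ++ "\nM 0"

-- ===== PRECONDITION & SPEC =====
def Spec_breathing_circuit_py (n_rounds : Int) (out : String) : Prop := out = breathing_circuit_py_alt n_rounds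
instance (n_rounds : Int) (out : String) : Decidable (Spec_breathing_circuit_py n_rounds out) := by unfold Spec_breathing_circuit_py; infer_instance

-- ===== CLAIM (what is proved, stated in full; the proofs are below) =====
def Claim_equal_breathing_circuit_py : Prop := ∀ (n_rounds : Int), Dom_breathing_circuit_py n_rounds → Spec_breathing_circuit_py n_rounds (breathing_circuit_py n_rounds)

-- ===== LEMMAS AND PROOFS =====

-- A's loop ignores the range elements: it appends m copies of the five-line block
theorem pv_foldl_const_append {α : Type} :
    ∀ (l : List α) (init : List String),
      l.foldl (fun acc _ => acc ++ ["H 1"] ++ ["T 1"] ++ ["CX 1 0"] ++ ["M 1"] ++ ["R 1"]) init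
        = init ++ (List.replicate l.length ["H 1", "T 1", "CX 1 0", "M 1", "R 1"]).flatten := by
  intro l
  induction l with
  | nil => intro init; simp
  | cons x xs ih =>
    intro init
    simp [List.foldl_cons, List.replicate_succ]

-- join "\n" with an arbitrary first line, m round blocks and the final "M 0"
theorem pv_join_blocks (m : Nat) :
    ∀ (x : List Char),
      PySem.Chars.join "\n".toList
          (x :: ((List.replicate m ["H 1".toList, "T 1".toList, "CX 1 0".toList, "M 1".toList, "R 1".toList]).flatten
             ++ ["M 0".toList]))
        = x ++ (List.replicate m "\nH 1\nT 1\nCX 1 0\nM 1\nR 1".toList).flatten ++ "\nM 0".toList := by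
  induction m with
  | zero =>
    intro x
    simp [PySem.Chars.join_cons_cons, PySem.Chars.join_singleton]
  | succ m ih =>
    intro x
    simp only [List.replicate_succ, List.flatten_cons, List.cons_append, List.append_assoc]
    rw [PySem.Chars.join_cons_cons, PySem.Chars.join_cons_cons, PySem.Chars.join_cons_cons,
        PySem.Chars.join_cons_cons, PySem.Chars.join_cons_cons]
    simp only [List.nil_append]
    rw [ih "R 1".toList]
    simp [List.append_assoc]

-- ===== VERDICT (by name: the statement is the Claim_ definition above) =====
theorem breathing_circuit_py_spec : Claim_equal_breathing_circuit_py := by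
  intro n _
  unfold Spec_breathing_circuit_py breathing_circuit_py breathing_circuit_py_alt pyStrMul
  apply String.toList_inj.mp
  dsimp only
  rw [pv_foldl_const_append]
  rw [PySem.Str.toList_join]
  simp only [List.map_append, List.map_cons, List.map_nil, List.map_flatten, List.map_replicate,
    PySem.List.length_pyRange_one, List.cons_append, List.nil_append]
  rw [PySem.Chars.join_cons_cons]
  rw [pv_join_blocks (n - 0).toNat "T 0".toList]
  simp
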